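-- pv_equiv track=rewrite | github.com/METResearchGroup/bluesky-research | services/sync/stream/experiments/cache_write_load_test.py | _batch_sizes
-- ===== SOURCE A (Python) =====
-- def _batch_sizes(default_batch_size: int) -> list[int]:
--     # Include 1 (unbatched) and scale up to the default.
--     candidates = [1, 10, 50, 100, 250, 500, default_batch_size]
--     # Deduplicate while preserving order.
--     out: list[int] = []
--     for b in candidates:
--         if b not in out and b <= default_batch_size:
--             out.append(b)
--     if out[-1] != default_batch_size:
--         out.append(default_batch_size)
--     return out
-- ===== SOURCE B (Python) =====
-- def _batch_sizes(default_batch_size: int) -> list[int]: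
--     # Different strategy: no filtering and no dedup at all. The fixed steps are
--     # already sorted, so the output is exactly the steps STRICTLY below the
--     # default, followed by the default itself; build that by structural
--     # recursion down the step list.
--     def below(steps):
--         if not steps or steps[0] >= default_batch_size:
--             return [default_batch_size]
--         return [steps[0]] + below(steps[1:])
--     return below([1, 10, 50, 100, 250, 500])
-- ===== Notes on version B (the rewrite author's own statement) =====
-- stated objective: alternative
-- what changed: Drops A's filter-and-dedup membership loop entirely: B recursively takes the sorted fixed steps strictly below the default and appends the default once, exploiting that the step list is sorted so no <= filter, no membership test and no trailing-append fixup are needed.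
import Mathlib
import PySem

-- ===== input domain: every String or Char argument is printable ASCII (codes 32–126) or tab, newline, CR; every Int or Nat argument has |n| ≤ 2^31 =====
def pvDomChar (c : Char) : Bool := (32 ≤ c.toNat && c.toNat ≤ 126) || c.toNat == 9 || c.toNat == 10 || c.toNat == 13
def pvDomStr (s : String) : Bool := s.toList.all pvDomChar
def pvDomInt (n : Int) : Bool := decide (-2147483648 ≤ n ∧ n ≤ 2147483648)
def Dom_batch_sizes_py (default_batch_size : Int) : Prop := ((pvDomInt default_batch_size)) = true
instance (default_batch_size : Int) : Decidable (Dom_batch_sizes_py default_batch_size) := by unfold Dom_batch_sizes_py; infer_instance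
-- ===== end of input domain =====

-- B drops A's filter-and-dedup loop: it recursively takes the sorted fixed steps strictly
-- below the default and appends the default once; objective: alternative (not claimed faster).

-- ===== PORT A =====
-- the dedup-while-filtering loop over the candidate list (A's `for b in candidates`)
def pvALoop (d : Int) : List Int :=
  ([1, 10, 50, 100, 250, 500, d] : List Int).foldl
    (fun out b => if b ∉ out ∧ b ≤ d then out ++ [b] else out) []

def batch_sizes_py (default_batch_size : Int) : List Int :=
  -- out[-1]: PySem.List.pyGet? with index -1; the loop always retains default_batch_size,
  -- so the `none` (IndexError) arm is unreachable and A is total.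
  match PySem.List.pyGet? (pvALoop default_batch_size) (-1) with
  | some last =>
      if last ≠ default_batch_size then pvALoop default_batch_size ++ [default_batch_size]
      else pvALoop default_batch_size
  | none => pvALoop default_batch_size

-- ===== PORT B =====
-- Source B's inner recursion `below(steps)`: steps strictly below the default, then the default
def pvBelow (d : Int) : List Int → List Int
  | [] => [d]
  | s :: rest => if s ≥ d then [d] else s :: pvBelow d rest

def batch_sizes_py_alt (default_batch_size : Int) : List Int :=
  pvBelow default_batch_size [1, 10, 50, 100, 250, 500]

-- ===== PRECONDITION & SPEC =====
def Spec_batch_sizes_py (default_batch_size : Int) (out : List Int) : Prop := out = batch_sizes_py_alt default_batch_size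
instance (default_batch_size : Int) (out : List Int) : Decidable (Spec_batch_sizes_py default_batch_size out) := by unfold Spec_batch_sizes_py; infer_instance

-- ===== CLAIM (what is proved, stated in full; the proofs are below) =====
def Claim_equal_batch_sizes_py : Prop := ∀ (default_batch_size : Int), Dom_batch_sizes_py default_batch_size → Spec_batch_sizes_py default_batch_size (batch_sizes_py default_batch_size)

-- ===== LEMMAS AND PROOFS =====

-- ===== VERDICT (by name: the statement is the Claim_ definition above) =====
theorem batch_sizes_py_spec : Claim_equal_batch_sizes_py := by
  intro d _
  unfold Spec_batch_sizes_py
  rcases lt_trichotomy d 1 with h0 | h0 | h0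
  · have hout : pvALoop d = [d] := by
      simp [pvALoop, show ¬ (1:Int) ≤ d by omega, show ¬ (10:Int) ≤ d by omega,
        show ¬ (50:Int) ≤ d by omega, show ¬ (100:Int) ≤ d by omega,
        show ¬ (250:Int) ≤ d by omega, show ¬ (500:Int) ≤ d by omega]
    unfold batch_sizes_py
    rw [hout]
    simp [batch_sizes_py_alt, pvBelow, PySem.List.pyGet?, PySem.List.pyIdx?,
      show (1:Int) ≥ d by omega]
  · subst h0; decide
  · rcases lt_trichotomy d 10 with h1 | h1 | h1
    · have hout : pvALoop d = [1, d] := by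
        simp [pvALoop, show (1:Int) ≤ d by omega, show ¬ (10:Int) ≤ d by omega,
          show ¬ (50:Int) ≤ d by omega, show ¬ (100:Int) ≤ d by omega,
          show ¬ (250:Int) ≤ d by omega, show ¬ (500:Int) ≤ d by omega,
          show d ≠ 1 by omega, show ¬ d < 1 by omega]
      unfold batch_sizes_py
      rw [hout]
      simp [batch_sizes_py_alt, pvBelow, PySem.List.pyGet?, PySem.List.pyIdx?,
        show ¬ (1:Int) ≥ d by omega, show (10:Int) ≥ d by omega, show d ≠ 1 by omega]
    · subst h1; decide
    · rcases lt_trichotomy d 50 with h2 | h2 | h2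
      · have hout : pvALoop d = [1, 10, d] := by
          simp [pvALoop, show (1:Int) ≤ d by omega, show (10:Int) ≤ d by omega,
            show ¬ (50:Int) ≤ d by omega, show ¬ (100:Int) ≤ d by omega,
            show ¬ (250:Int) ≤ d by omega, show ¬ (500:Int) ≤ d by omega,
            show d ≠ 1 by omega, show d ≠ 10 by omega,
            show ¬ d < 1 by omega, show ¬ d < 10 by omega]
        unfold batch_sizes_py
        rw [hout]
        simp [batch_sizes_py_alt, pvBelow, PySem.List.pyGet?, PySem.List.pyIdx?,
          show ¬ (1:Int) ≥ d by omega, show ¬ (10:Int) ≥ d by omega,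
          show (50:Int) ≥ d by omega, show d ≠ 10 by omega]
      · subst h2; decide
      · rcases lt_trichotomy d 100 with h3 | h3 | h3
        · have hout : pvALoop d = [1, 10, 50, d] := by
            simp [pvALoop, show (1:Int) ≤ d by omega, show (10:Int) ≤ d by omega,
              show (50:Int) ≤ d by omega, show ¬ (100:Int) ≤ d by omega,
              show ¬ (250:Int) ≤ d by omega, show ¬ (500:Int) ≤ d by omega,
              show d ≠ 1 by omega, show d ≠ 10 by omega, show d ≠ 50 by omega,
              show ¬ d < 1 by omega, show ¬ d < 10 by omega, show ¬ d < 50 by omega]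
          unfold batch_sizes_py
          rw [hout]
          simp [batch_sizes_py_alt, pvBelow, PySem.List.pyGet?, PySem.List.pyIdx?,
            show ¬ (1:Int) ≥ d by omega, show ¬ (10:Int) ≥ d by omega,
            show ¬ (50:Int) ≥ d by omega, show (100:Int) ≥ d by omega, show d ≠ 50 by omega]
        · subst h3; decide
        · rcases lt_trichotomy d 250 with h4 | h4 | h4
          · have hout : pvALoop d = [1, 10, 50, 100, d] := by
              simp [pvALoop, show (1:Int) ≤ d by omega, show (10:Int) ≤ d by omega,
                show (50:Int) ≤ d by omega, show (100:Int) ≤ d by omega,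
                show ¬ (250:Int) ≤ d by omega, show ¬ (500:Int) ≤ d by omega,
                show d ≠ 1 by omega, show d ≠ 10 by omega, show d ≠ 50 by omega,
                show d ≠ 100 by omega, show ¬ d < 1 by omega, show ¬ d < 10 by omega,
                show ¬ d < 50 by omega, show ¬ d < 100 by omega]
            unfold batch_sizes_py
            rw [hout]
            simp [batch_sizes_py_alt, pvBelow, PySem.List.pyGet?, PySem.List.pyIdx?,
              show ¬ (1:Int) ≥ d by omega, show ¬ (10:Int) ≥ d by omega,
              show ¬ (50:Int) ≥ d by omega, show ¬ (100:Int) ≥ d by omega,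
              show (250:Int) ≥ d by omega, show d ≠ 100 by omega]
          · subst h4; decide
          · rcases lt_trichotomy d 500 with h5 | h5 | h5
            · have hout : pvALoop d = [1, 10, 50, 100, 250, d] := by
                simp [pvALoop, show (1:Int) ≤ d by omega, show (10:Int) ≤ d by omega,
                  show (50:Int) ≤ d by omega, show (100:Int) ≤ d by omega,
                  show (250:Int) ≤ d by omega, show ¬ (500:Int) ≤ d by omega,
                  show d ≠ 1 by omega, show d ≠ 10 by omega, show d ≠ 50 by omega,
                  show d ≠ 100 by omega, show d ≠ 250 by omega, show ¬ d < 1 by omega,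
                  show ¬ d < 10 by omega, show ¬ d < 50 by omega, show ¬ d < 100 by omega,
                  show ¬ d < 250 by omega]
              unfold batch_sizes_py
              rw [hout]
              simp [batch_sizes_py_alt, pvBelow, PySem.List.pyGet?, PySem.List.pyIdx?,
                show ¬ (1:Int) ≥ d by omega, show ¬ (10:Int) ≥ d by omega,
                show ¬ (50:Int) ≥ d by omega, show ¬ (100:Int) ≥ d by omega,
                show ¬ (250:Int) ≥ d by omega, show (500:Int) ≥ d by omega,
                show d ≠ 250 by omega]
            · subst h5; decide
            · have hout : pvALoop d = [1, 10, 50, 100, 250, 500, d] := by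
                simp [pvALoop, show (1:Int) ≤ d by omega, show (10:Int) ≤ d by omega,
                  show (50:Int) ≤ d by omega, show (100:Int) ≤ d by omega,
                  show (250:Int) ≤ d by omega, show (500:Int) ≤ d by omega,
                  show d ≠ 1 by omega, show d ≠ 10 by omega, show d ≠ 50 by omega,
                  show d ≠ 100 by omega, show d ≠ 250 by omega, show d ≠ 500 by omega,
                  show ¬ d < 1 by omega, show ¬ d < 10 by omega, show ¬ d < 50 by omega,
                  show ¬ d < 100 by omega, show ¬ d < 250 by omega, show ¬ d < 500 by omega]
              unfold batch_sizes_py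
              rw [hout]
              simp [batch_sizes_py_alt, pvBelow, PySem.List.pyGet?, PySem.List.pyIdx?,
                show ¬ (1:Int) ≥ d by omega, show ¬ (10:Int) ≥ d by omega,
                show ¬ (50:Int) ≥ d by omega, show ¬ (100:Int) ≥ d by omega,
                show ¬ (250:Int) ≥ d by omega, show ¬ (500:Int) ≥ d by omega,
                show d ≠ 500 by omega]
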